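-- pv_equiv track=rewrite | github.com/bcalagoz/inf211 | laboratory_assignments/laboratory_assignment_5/lab5_burakcan_alagoz_190102002006.py | problem6
-- ===== SOURCE A (Python) =====
-- def problem6(string):
--     string = string.lower()
--     if len(string) == 1:
--         return [string]
--     else:
--         perms = []
--         for i in range(len(string)):
--             for perm in problem6(string[:i] + string[i+1:]):
--                 perms.append(string[i] + perm)
--             perms.append(string[i])
--
--     perms.sort()
--     unique_perms = list(set(perms))
--     unique_perms.sort()
--     return unique_perms
-- ===== SOURCE B (Python) =====
-- def problem6(string):
--     # One left-to-right pass over the lowercased characters: each character is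
--     # inserted at every position of every partial permutation found so far
--     # (and added as a singleton), accumulating the set of all distinct
--     # non-empty partial permutations; finally return them sorted.
--     out = set()
--     for c in string.lower():
--         out |= {p[:i] + c + p[i:] for p in out for i in range(len(p) + 1)} | {c}
--     return sorted(out)
-- ===== Notes on version B (the rewrite author's own statement) =====
-- stated objective: alternative
-- what changed: Replaces A's recursion that removes each index, recurses on the shrunken string and sorts+dedups at every recursion node by a single left-to-right fold over the lowercased characters that inserts each character at every position of every partial permutation collected so far in one global set, sorted once at the end.
import Mathlib
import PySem

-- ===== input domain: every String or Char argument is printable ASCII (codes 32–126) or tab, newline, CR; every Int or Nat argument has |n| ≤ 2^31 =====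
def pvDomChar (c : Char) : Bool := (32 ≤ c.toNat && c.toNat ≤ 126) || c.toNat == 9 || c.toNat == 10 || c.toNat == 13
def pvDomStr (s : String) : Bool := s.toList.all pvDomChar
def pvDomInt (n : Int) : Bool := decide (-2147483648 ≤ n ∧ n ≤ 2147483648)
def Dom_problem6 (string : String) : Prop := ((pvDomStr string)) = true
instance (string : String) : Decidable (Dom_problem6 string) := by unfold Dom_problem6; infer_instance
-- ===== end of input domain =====

-- B replaces A's index-removal recursion (which sorts and dedups at every node) by a single
-- left-to-right fold over the lowercased characters that grows one global set of partial
-- permutations, sorted once at the end; same return value on every input.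

-- needed by problem6's termination proof (cited in decreasing_by)
theorem pvLengthLower (s : List Char) : (PySem.Chars.lower s).length = s.length := by
  simp [PySem.Chars.lower]

-- ===== PORT A =====
-- Literal port of A on the code-point lists (Python str ops are PySem.Chars on s.toList;
-- string[i] is read with pyGetD, exact here because i ranges over range(len(string));
-- list(set(perms)) has CPython hash order, but the value returned is re-sorted, so porting
-- it as PySem.Set.ofList followed by sorted yields exactly Python's return value.
def problem6Core (s : List Char) : List (List Char) :=
  let t := PySem.Chars.lower s
  if PySem.Chars.len t == 1 then [t]
  else
    let perms := (PySem.List.pyRange 0 (PySem.Chars.len t)).attach.foldl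
      (fun perms i =>
        ((problem6Core (PySem.Chars.slice t none (some i.1) ++
                        PySem.Chars.slice t (some (i.1 + 1)) none)).foldl
            (fun acc perm => acc ++ [PySem.List.pyGetD t i.1 ' ' :: perm]) perms)
          ++ [[PySem.List.pyGetD t i.1 ' ']]) []
    let perms := PySem.List.sorted perms (fun x => x)
    let uniquePerms := PySem.Set.ofList perms
    PySem.List.sorted uniquePerms (fun x => x)
  termination_by s.length
  decreasing_by
    have hi := i.2
    simp only [PySem.List.mem_pyRange_one, PySem.Chars.len_eq] at hi
    have e1 := PySem.List.slice_to (PySem.Chars.lower s) (b := (i.1 : Int)) (by omega)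
    have e2 := PySem.List.slice_from (PySem.Chars.lower s) (a := (i.1 : Int) + 1) (by omega)
    rw [PySem.Chars.slice_eq_listSlice, PySem.Chars.slice_eq_listSlice, e1, e2]
    simp only [List.length_append, List.length_take, List.length_drop, pvLengthLower]
    have ht : t.length = s.length := pvLengthLower s
    omega

def problem6 (string : String) : List String :=
  (problem6Core string.toList).map String.ofList

-- ===== PORT B =====
-- the body of B's 'for c in string.lower()' loop:
-- out |= {p[:i] + c + p[i:] for p in out for i in range(len(p) + 1)} | {c}
def altStep (out : PySem.Set (List Char)) (c : Char) : PySem.Set (List Char) :=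
  PySem.Set.union out
    (PySem.Set.union
      (PySem.Set.ofList (out.flatMap (fun p =>
        (PySem.List.pyRange 0 (PySem.Chars.len p + 1)).map
          (fun i => PySem.Chars.slice p none (some i) ++ [c] ++
                    PySem.Chars.slice p (some i) none))))
      [[c]])

def problem6_alt (string : String) : List String :=
  let out := (PySem.Chars.lower string.toList).foldl altStep PySem.Set.empty
  (PySem.List.sorted out (fun x => x)).map String.ofList

-- ===== PRECONDITION & SPEC =====
def Spec_problem6 (string : String) (out : List String) : Prop := out = problem6_alt string
instance (string : String) (out : List String) : Decidable (Spec_problem6 string out) := by unfold Spec_problem6; infer_instance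

-- ===== CLAIM (what is proved, stated in full; the proofs are below) =====
def Claim_equal_problem6 : Prop := ∀ (string : String), Dom_problem6 string → Spec_problem6 string (problem6 string)

-- ===== LEMMAS AND PROOFS =====

theorem pvLowerCharIdem (c : Char) :
    PySem.Chars.lowerChar (PySem.Chars.lowerChar c) = PySem.Chars.lowerChar c := by
  unfold PySem.Chars.lowerChar PySem.Chars.isupper
  split_ifs with h1 h2 <;> try rfl
  exfalso
  simp only [Bool.and_eq_true, decide_eq_true_eq] at h1 h2
  have hA : (65:Nat) ≤ c.toNat := Fin.mk_le_mk.mp h1.1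
  have hZ : c.toNat ≤ 90 := Fin.mk_le_mk.mp h1.2
  have hv : Nat.isValidChar (c.toNat + 32) := Or.inl (by omega)
  have hto : (Char.ofNat (c.toNat + 32)).toNat = c.toNat + 32 := by
    rw [Char.ofNat, dif_pos hv]
    simp [Char.ofNatAux]
    omega
  have h90 : (Char.ofNat (c.toNat + 32)).toNat ≤ 90 := Fin.mk_le_mk.mp h2.2
  omega

-- the instances `List.instLT` (picked by the ports) and `List.instLinearOrder.toLT` agree
theorem pvSortedInstEq (xs : List (List Char)) :
    @PySem.List.sorted (List Char) (List Char) List.instLT (fun a b => a.decidableLT b) xs (fun x => x) false =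
      @PySem.List.sorted (List Char) (List Char) List.instLinearOrder.toLT LinearOrder.toDecidableLT xs (fun x => x) false := by
  congr 1


theorem pvRemovalIff (t x : List Char) :
    (∃ k : Nat, ∃ (hk : k < t.length),
        ((∃ p, (p ≠ [] ∧ p.Subperm (t.eraseIdx k)) ∧ x = t[k] :: p) ∨ x = [t[k]])) ↔
      (x ≠ [] ∧ x.Subperm t) := by
  constructor
  · rintro ⟨k, hk, h⟩
    have hperm : t.Perm (t[k] :: t.eraseIdx k) := by
      conv_lhs => rw [← List.take_append_drop k t, ← List.getElem_cons_drop (h := hk)]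
      rw [List.eraseIdx_eq_take_drop_succ]
      exact List.perm_middle
    rcases h with ⟨p, ⟨hp0, hps⟩, rfl⟩ | rfl
    · exact ⟨by simp, ((List.subperm_cons _).mpr hps).trans hperm.symm.subperm⟩
    · exact ⟨by simp, List.singleton_subperm_iff.mpr (List.getElem_mem hk)⟩
  · rintro ⟨hne, hsub⟩
    obtain ⟨c, x', rfl⟩ := List.exists_cons_of_ne_nil hne
    have hc : c ∈ t := hsub.subset (List.mem_cons_self)
    have hklt : t.idxOf c < t.length := List.idxOf_lt_length_of_mem hc
    refine ⟨t.idxOf c, hklt, ?_⟩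
    have hg : t[t.idxOf c]'hklt = c := List.getElem_idxOf _
    have he : t.eraseIdx (t.idxOf c) = t.erase c := (List.erase_eq_eraseIdx_of_idxOf rfl).symm
    have hx' : x'.Subperm (t.erase c) := by
      have h2 : (c :: x').Subperm (c :: t.erase c) := hsub.trans (List.perm_cons_erase hc).subperm
      exact (List.subperm_cons c).mp h2
    cases x' with
    | nil => exact Or.inr (by rw [hg])
    | cons a b =>
        exact Or.inl ⟨a :: b, ⟨by simp, by rw [he]; exact hx'⟩, by rw [hg]⟩

theorem pvInsertIff (done : List Char) (c : Char) (y : List Char) :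
    ((y ≠ [] ∧ y.Subperm done) ∨
      (∃ p, (p ≠ [] ∧ p.Subperm done) ∧ ∃ k : Nat, k ≤ p.length ∧ y = p.take k ++ c :: p.drop k) ∨
      y = [c]) ↔
    (y ≠ [] ∧ y.Subperm (done ++ [c])) := by
  constructor
  · rintro (⟨h0, hs⟩ | ⟨p, ⟨hp0, hps⟩, k, hk, rfl⟩ | rfl)
    · exact ⟨h0, hs.trans (List.sublist_append_left done [c]).subperm⟩
    · refine ⟨by simp, ?_⟩
      have hyp : (p.take k ++ c :: p.drop k).Perm (c :: p) := by
        have h := List.perm_middle (a := c) (l₁ := p.take k) (l₂ := p.drop k)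
        rwa [List.take_append_drop] at h
      have h2 : (c :: p).Subperm (c :: done) := (List.subperm_cons c).mpr hps
      exact (hyp.subperm.trans h2).trans (List.perm_append_singleton c done).symm.subperm
    · exact ⟨by simp, List.singleton_subperm_iff.mpr (by simp)⟩
  · rintro ⟨h0, hs⟩
    have hs' : y.Subperm (c :: done) := hs.trans (List.perm_append_singleton c done).subperm
    by_cases hc : c ∈ y
    · have hk : y.idxOf c < y.length := List.idxOf_lt_length_of_mem hc
      have hg : y[y.idxOf c] = c := List.getElem_idxOf _
      set k := y.idxOf c with hkdef
      set p := y.eraseIdx k with hpdef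
      have hep : p = y.erase c := by
        rw [hpdef, hkdef, ← List.erase_eq_eraseIdx_of_idxOf rfl]
      have htk : p.take k = y.take k := by
        rw [hpdef, List.eraseIdx_eq_take_drop_succ]
        exact List.take_left' (List.length_take_of_le (le_of_lt hk))
      have hdk : p.drop k = y.drop (k+1) := by
        rw [hpdef, List.eraseIdx_eq_take_drop_succ]
        exact List.drop_left' (List.length_take_of_le (le_of_lt hk))
      have hyeq : y = p.take k ++ c :: p.drop k := by
        rw [htk, hdk, ← hg, List.getElem_cons_drop, List.take_append_drop]
      have hps : p.Subperm done := by
        rw [List.subperm_ext_iff]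
        intro a ha
        have hay : a ∈ y := by
          rw [hep] at ha; exact List.mem_of_mem_erase ha
        have h1 := List.subperm_ext_iff.mp hs' a hay
        rw [List.count_cons] at h1
        by_cases hac : a = c
        · subst hac
          rw [hep, List.count_erase_self]
          simp at h1
          omega
        · rw [hep, List.count_erase_of_ne hac]
          have hca : ¬ (c = a) := fun h => hac h.symm
          simp [hca] at h1
          omega
      have hlen : p.length + 1 = y.length := by
        rw [hpdef]; exact List.length_eraseIdx_add_one hk
      cases hp : p with
      | nil =>
          refine Or.inr (Or.inr ?_)
          rw [hyeq, hp]; simp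
      | cons a b =>
          refine Or.inr (Or.inl ⟨p, ⟨by rw [hp]; simp, hps⟩, k, by omega, hyeq⟩)
    · refine Or.inl ⟨h0, ?_⟩
      rw [List.subperm_ext_iff]
      intro a ha
      have h1 := List.subperm_ext_iff.mp hs' a ha
      rw [List.count_cons] at h1
      have hca : ¬ (c = a) := by rintro rfl; exact hc ha
      simp [hca] at h1
      omega


theorem pvLowerIdem (s : List Char) :
    PySem.Chars.lower (PySem.Chars.lower s) = PySem.Chars.lower s := by
  simp [PySem.Chars.lower, List.map_map, Function.comp_def, pvLowerCharIdem]

-- both programs return exactly the distinct non-empty partial permutations, sorted;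
-- "x is a non-empty partial permutation of t" is x ≠ [] ∧ x.Subperm t
theorem pvCoreMem (s : List Char) (x : List Char) :
    x ∈ problem6Core s ↔ (x ≠ [] ∧ x.Subperm (PySem.Chars.lower s)) := by
  rw [problem6Core]
  by_cases h1 : (PySem.Chars.len (PySem.Chars.lower s) == 1) = true
  · rw [if_pos h1]
    simp only [PySem.Chars.len_eq, beq_iff_eq, Nat.cast_eq_one] at h1
    obtain ⟨c, hc⟩ := List.length_eq_one_iff.mp h1
    rw [hc]
    simp only [List.mem_singleton, List.subperm_singleton_iff]
    constructor
    · rintro rfl; simp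
    · rintro ⟨h0, rfl | rfl⟩
      · exact absurd rfl h0
      · rfl
  · rw [if_neg h1]
    have hlen1 : (PySem.Chars.lower s).length ≠ 1 := by
      intro h; exact h1 (by simp [PySem.Chars.len_eq, h])
    simp only [PySem.List.mem_sorted, PySem.Set.mem_ofList,
      PySem.List.foldl_append_singleton_eq_map, List.append_assoc]
    rw [PySem.List.foldl_append_eq_flatMap]
    simp only [List.nil_append, List.mem_flatMap, List.mem_attach, Subtype.exists,
      List.mem_append, List.mem_map, List.mem_singleton, true_and]
    rw [← pvRemovalIff (PySem.Chars.lower s) x]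
    constructor
    · rintro ⟨i, hi, h⟩
      rw [PySem.List.mem_pyRange_one, PySem.Chars.len_eq] at hi
      have h0 : (0:Int) ≤ i := hi.1
      have hilt : i < ((PySem.Chars.lower s).length : Int) := hi.2
      have hk : i.toNat < (PySem.Chars.lower s).length := by omega
      have hG : PySem.List.pyGetD (PySem.Chars.lower s) i ' ' = (PySem.Chars.lower s)[i.toNat] :=
        PySem.List.pyGetD_eq_getElem _ ' ' h0 hilt
      have hArg : PySem.Chars.lower
          (PySem.Chars.slice (PySem.Chars.lower s) none (some i) ++
            PySem.Chars.slice (PySem.Chars.lower s) (some (i + 1))) =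
          (PySem.Chars.lower s).eraseIdx i.toNat := by
        rw [PySem.Chars.slice_eq_listSlice, PySem.Chars.slice_eq_listSlice,
          PySem.List.slice_to (PySem.Chars.lower s) (b := i) h0,
          PySem.List.slice_from (PySem.Chars.lower s) (a := i + 1) (by omega)]
        unfold PySem.Chars.lower
        rw [List.map_append, List.map_take, List.map_drop, ← PySem.Chars.lower,
          ← PySem.Chars.lower, pvLowerIdem, List.eraseIdx_eq_take_drop_succ]
        congr 2
        omega
      refine ⟨i.toNat, hk, ?_⟩
      rcases h with ⟨p, hp, rfl⟩ | rfl
      · rw [pvCoreMem _ p, hArg] at hp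
        exact Or.inl ⟨p, hp, by rw [hG]⟩
      · exact Or.inr (by rw [hG])
    · rintro ⟨k, hk, h⟩
      refine ⟨(k : Int), ?_, ?_⟩
      · rw [PySem.List.mem_pyRange_one, PySem.Chars.len_eq]
        omega
      · have hG : PySem.List.pyGetD (PySem.Chars.lower s) (k : Int) ' ' =
            (PySem.Chars.lower s)[k] := by
          have h := PySem.List.pyGetD_eq_getElem (PySem.Chars.lower s) (i := (k : Int)) ' '
            (by omega) (by exact_mod_cast hk)
          simpa using h
        have hArg : PySem.Chars.lower
            (PySem.Chars.slice (PySem.Chars.lower s) none (some (k : Int)) ++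
              PySem.Chars.slice (PySem.Chars.lower s) (some ((k : Int) + 1))) =
            (PySem.Chars.lower s).eraseIdx k := by
          rw [PySem.Chars.slice_eq_listSlice, PySem.Chars.slice_eq_listSlice,
            PySem.List.slice_to (PySem.Chars.lower s) (b := (k : Int)) (by omega),
            PySem.List.slice_from (PySem.Chars.lower s) (a := (k : Int) + 1) (by omega)]
          unfold PySem.Chars.lower
          rw [List.map_append, List.map_take, List.map_drop, ← PySem.Chars.lower,
            ← PySem.Chars.lower, pvLowerIdem, List.eraseIdx_eq_take_drop_succ]
          congr 2
        rcases h with ⟨p, hp, hx⟩ | hx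
        · refine Or.inl ⟨p, ?_, by rw [hG, ← hx]⟩
          rw [pvCoreMem _ p, hArg]
          exact hp
        · exact Or.inr (by rw [hG, ← hx])
  termination_by s.length
  decreasing_by
  · simp only [List.length_append, PySem.Chars.slice_eq_listSlice]
    rw [PySem.List.slice_to (PySem.Chars.lower s) (b := i) h0,
        PySem.List.slice_from (PySem.Chars.lower s) (a := i + 1) (by omega)]
    simp only [List.length_take, List.length_drop, pvLengthLower]
    have ht := pvLengthLower s
    omega
  · simp only [List.length_append, PySem.Chars.slice_eq_listSlice]
    rw [PySem.List.slice_to (PySem.Chars.lower s) (b := (k : Int)) (by omega),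
        PySem.List.slice_from (PySem.Chars.lower s) (a := (k : Int) + 1) (by omega)]
    simp only [List.length_take, List.length_drop, pvLengthLower]
    have ht := pvLengthLower s
    omega

theorem pvCorePairwise (s : List Char) :
    (problem6Core s).Pairwise (· < ·) := by
  rw [problem6Core]
  split_ifs with h1
  · simp
  · rw [pvSortedInstEq]
    exact PySem.List.sorted_ofList_pairwise_lt _

theorem pvAltStepMem (out : PySem.Set (List Char)) (c : Char) (y : List Char) :
    y ∈ altStep out c ↔
      (y ∈ out ∨ (∃ p, p ∈ out ∧ ∃ k : Nat, k ≤ p.length ∧ y = p.take k ++ c :: p.drop k) ∨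
        y = [c]) := by
  unfold altStep
  simp only [PySem.Set.mem_union, PySem.Set.mem_ofList, List.mem_flatMap, List.mem_map,
    List.mem_singleton]
  refine or_congr Iff.rfl (or_congr ?_ Iff.rfl)
  refine exists_congr fun p => and_congr Iff.rfl ?_
  constructor
  · rintro ⟨i, hi, rfl⟩
    rw [PySem.List.mem_pyRange_one, PySem.Chars.len_eq] at hi
    refine ⟨i.toNat, by omega, ?_⟩
    have e1 := PySem.List.slice_to p (b := i) (by omega)
    have e2 := PySem.List.slice_from p (a := i) (by omega)
    rw [PySem.Chars.slice_eq_listSlice, PySem.Chars.slice_eq_listSlice, e1, e2]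
    simp
  · rintro ⟨k, hk, rfl⟩
    refine ⟨(k : Int), ?_, ?_⟩
    · rw [PySem.List.mem_pyRange_one, PySem.Chars.len_eq]
      omega
    · rw [PySem.Chars.slice_eq_listSlice, PySem.Chars.slice_eq_listSlice,
        PySem.List.slice_to_natCast, PySem.List.slice_from_natCast]
      simp

theorem pvAltInv (cs : List Char) (acc : PySem.Set (List Char)) (done : List Char)
    (hnd : acc.Nodup) (hmem : ∀ y, y ∈ acc ↔ (y ≠ [] ∧ y.Subperm done)) :
    (cs.foldl altStep acc).Nodup ∧
      ∀ y, y ∈ cs.foldl altStep acc ↔ (y ≠ [] ∧ y.Subperm (done ++ cs)) := by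
  induction cs generalizing acc done with
  | nil => simpa using ⟨hnd, hmem⟩
  | cons c cs ih =>
      rw [List.foldl_cons]
      have hnd' : (altStep acc c).Nodup := PySem.Set.nodup_union _ _ hnd
      have hmem' : ∀ y, y ∈ altStep acc c ↔ (y ≠ [] ∧ y.Subperm (done ++ [c])) := by
        intro y
        rw [pvAltStepMem, ← pvInsertIff done c y]
        simp only [hmem]
      have h := ih (altStep acc c) (done ++ [c]) hnd' hmem'
      simpa [List.append_assoc] using h

theorem pvCoreEqAlt (l : List Char) :
    problem6Core l =
      PySem.List.sorted ((PySem.Chars.lower l).foldl altStep PySem.Set.empty) (fun x => x) := by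
  have hout := pvAltInv (PySem.Chars.lower l) PySem.Set.empty [] (List.nodup_nil)
    (by intro y; simp [PySem.Set.empty, List.subperm_nil])
  have hpw := pvCorePairwise l
  have hnd : (problem6Core l).Nodup := hpw.imp (fun h => ne_of_lt h)
  rw [pvSortedInstEq]
  refine (PySem.List.sorted_eq_of_perm_of_pairwise_lt _ _ _ ?_ hpw).symm
  refine (List.perm_ext_iff_of_nodup hnd hout.1).mpr ?_
  intro y
  rw [pvCoreMem, hout.2]
  simp

-- ===== VERDICT (by name: the statement is the Claim_ definition above) =====
theorem problem6_spec : Claim_equal_problem6 := by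
  intro string _
  unfold Spec_problem6 problem6 problem6_alt
  rw [pvCoreEqAlt]
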